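-- pv_equiv track=rewrite | github.com/annbaeva/Cryptology_Lab_Tasks | Lab_4_task/main.py | stretch_key
-- ===== SOURCE A (Python) =====
-- def stretch_key(key, text):
--     i = 0
--     new_key = ""
--     text_without_spaces = len(text.replace(" ",""))
--     starter_key_lenght = len(key)
--     while len(new_key) <= len(text):
--         if i == starter_key_lenght:
--             i -= starter_key_lenght
--         new_key += key[i]
--         i += 1
--     return new_key
-- ===== SOURCE B (Python) =====
-- def stretch_key(key, text):
--     n = len(text) + 1
--     return (key * (n // len(key) + 1))[:n]
-- ===== Notes on version B (the rewrite author's own statement) =====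
-- stated objective: faster
-- what changed: Replace the char-by-char while loop that concatenates key[i] (quadratic string building) with a single string repetition followed by one slice of length len(text)+1.
import Mathlib
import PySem

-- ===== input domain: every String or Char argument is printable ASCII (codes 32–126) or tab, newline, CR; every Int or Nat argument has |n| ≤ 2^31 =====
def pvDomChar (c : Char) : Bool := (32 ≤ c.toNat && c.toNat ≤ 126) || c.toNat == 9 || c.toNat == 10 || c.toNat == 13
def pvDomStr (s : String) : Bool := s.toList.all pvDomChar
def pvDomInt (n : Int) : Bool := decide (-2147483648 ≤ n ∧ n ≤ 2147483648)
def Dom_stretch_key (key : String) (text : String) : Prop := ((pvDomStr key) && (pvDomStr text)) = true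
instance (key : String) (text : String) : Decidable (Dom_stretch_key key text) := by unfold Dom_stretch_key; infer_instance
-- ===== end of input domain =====

-- B changes A's quadratic char-by-char while-loop into one repetition + one slice (measured faster).
-- ===== PORT A =====
-- the while loop: while len(new_key) <= len(text): if i == klen: i -= klen; new_key += key[i]; i += 1
-- key[i] is PySem.List.pyGet? (none = IndexError, loop stops returning acc; excluded by Pre_)
def stretchKeyLoop (key : List Char) (tlen : Nat) (i : Nat) (acc : List Char) : List Char :=
  if _h : acc.length ≤ tlen then
    let i' := if i = key.length then i - key.length else i
    match PySem.List.pyGet? key (Int.ofNat i') with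
    | some c => stretchKeyLoop key tlen (i' + 1) (acc ++ [c])
    | none => acc
  else acc
termination_by tlen + 1 - acc.length
decreasing_by simp_all; omega

def stretch_key (key : String) (text : String) : String :=
  -- i = 0; new_key = ""; text_without_spaces is computed and unused, as in A
  let _text_without_spaces := (PySem.Str.replace text " " "").length
  String.ofList (stretchKeyLoop key.toList text.toList.length 0 [])

-- ===== PORT B =====
-- n = len(text) + 1; return (key * (n // len(key) + 1))[:n]
def stretch_key_alt (key : String) (text : String) : String :=
  let n := text.toList.length + 1
  String.ofList (((List.replicate (n / key.toList.length + 1) key.toList).flatten).take n)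

-- ===== PRECONDITION & SPEC =====
-- A raises IndexError on empty key (key[0]); B raises ZeroDivisionError there; excluded.
def Pre_stretch_key (key : String) (text : String) : Prop := key ≠ ""
instance (key : String) (text : String) : Decidable (Pre_stretch_key key text) := by unfold Pre_stretch_key; infer_instance
def pvWitness_stretch_key : String × String := ("a", "")
def Spec_stretch_key (key : String) (text : String) (out : String) : Prop := out = stretch_key_alt key text
instance (key : String) (text : String) (out : String) : Decidable (Spec_stretch_key key text out) := by unfold Spec_stretch_key; infer_instance

-- ===== CLAIM (what is proved, stated in full; the proofs are below) =====
def Claim_equal_stretch_key : Prop := ∀ (key : String) (text : String), Dom_stretch_key key text → Pre_stretch_key key text → Spec_stretch_key key text (stretch_key key text)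

-- ===== LEMMAS AND PROOFS =====

-- the cyclic sequence of m chars of key starting at position i (i may be key.length)
def cyc (key : List Char) : Nat → Nat → List Char
  | _, 0 => []
  | i, m + 1 =>
    let i' := if i = key.length then 0 else i
    key.getD i' ' ' :: cyc key (i' + 1) m

theorem loop_stop (key : List Char) (tlen i : Nat) (acc : List Char) (h : ¬ acc.length ≤ tlen) :
    stretchKeyLoop key tlen i acc = acc := by
  rw [stretchKeyLoop]; simp [h]

theorem loop_step (key : List Char) (tlen i : Nat) (acc : List Char) (h : acc.length ≤ tlen)
    (c : Char)
    (hc : PySem.List.pyGet? key (Int.ofNat (if i = key.length then i - key.length else i)) = some c) :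
    stretchKeyLoop key tlen i acc =
      stretchKeyLoop key tlen ((if i = key.length then i - key.length else i) + 1) (acc ++ [c]) := by
  rw [stretchKeyLoop]
  simp only [h, dif_pos, hc]

theorem loop_eq_cyc (key : List Char) (hk : key ≠ []) (tlen : Nat) :
    ∀ (m i : Nat) (acc : List Char), i ≤ key.length → m = tlen + 1 - acc.length →
      stretchKeyLoop key tlen i acc = acc ++ cyc key i m := by
  intro m
  induction m with
  | zero =>
    intro i acc _ hm
    have h : ¬ acc.length ≤ tlen := by omega
    rw [loop_stop key tlen i acc h]
    simp [cyc]
  | succ m ih =>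
    intro i acc hi hm
    have hacc : acc.length ≤ tlen := by omega
    have hklen : 0 < key.length := List.length_pos_of_ne_nil hk
    by_cases h : i = key.length
    · have hA : (if i = key.length then i - key.length else i) = 0 := by
        rw [if_pos h]; omega
      have hB : (if i = key.length then 0 else i) = 0 := if_pos h
      have hg : PySem.List.pyGet? key
          (Int.ofNat (if i = key.length then i - key.length else i)) = some key[0] := by
        rw [hA]; exact PySem.List.pyGet?_ofNat key 0 hklen
      rw [loop_step key tlen i acc hacc _ hg, hA]
      rw [ih 1 _ (by omega) (by simp; omega)]
      rw [cyc, hB, List.getD_eq_getElem key ' ' hklen]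
      simp
    · have hilt : i < key.length := by omega
      have hA : (if i = key.length then i - key.length else i) = i := if_neg h
      have hB : (if i = key.length then 0 else i) = i := if_neg h
      have hg : PySem.List.pyGet? key
          (Int.ofNat (if i = key.length then i - key.length else i)) = some key[i] := by
        rw [hA]; exact PySem.List.pyGet?_ofNat key i hilt
      rw [loop_step key tlen i acc hacc _ hg, hA]
      rw [ih (i + 1) _ (by omega) (by simp; omega)]
      rw [cyc, hB, List.getD_eq_getElem key ' ' hilt]
      simp

theorem replicate_flatten_comm (key : List Char) (m : Nat) :
    (List.replicate m key).flatten ++ key = key ++ (List.replicate m key).flatten := by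
  induction m with
  | zero => simp
  | succ m ih => simp [List.replicate_succ, ih]

theorem length_flatten_replicate (key : List Char) (m : Nat) :
    ((List.replicate m key).flatten).length = m * key.length := by
  induction m with
  | zero => simp
  | succ m ih => simp [List.replicate_succ, ih]; ring

theorem cyc_eq_rep (key : List Char) (hk : key ≠ []) :
    ∀ (m i : Nat), i ≤ key.length →
      cyc key i m = ((key.drop (if i = key.length then 0 else i)) ++ (List.replicate m key).flatten).take m := by
  intro m
  induction m with
  | zero => simp [cyc]
  | succ m ih =>
    intro i hi
    have hklen : 0 < key.length := List.length_pos_of_ne_nil hk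
    set i' := if i = key.length then 0 else i with hi'def
    have hi' : i' < key.length := by
      by_cases h : i = key.length <;> simp [hi'def, h] <;> omega
    have hdrop : key.drop i' = key[i'] :: key.drop (i' + 1) := List.drop_eq_getElem_cons hi'
    have hget : key.getD i' ' ' = key[i'] := List.getD_eq_getElem key ' ' hi'
    rw [cyc]
    simp only [← hi'def, hget, hdrop, List.replicate_succ, List.flatten_cons, List.cons_append,
      List.take_succ_cons]
    congr 1
    rw [ih (i' + 1) (by omega)]
    have hmk : m ≤ m * key.length := Nat.le_mul_of_pos_right m hklen
    by_cases h2 : i' + 1 = key.length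
    · rw [if_pos h2, List.drop_zero, h2, List.drop_length, List.nil_append]
    · rw [if_neg h2]
      have hlen2 : m ≤ (key.drop (i' + 1) ++ (List.replicate m key).flatten).length := by
        rw [List.length_append, length_flatten_replicate]
        omega
      rw [← replicate_flatten_comm, ← List.append_assoc,
        List.take_append_of_le_length hlen2]

theorem take_rep_eq (key : List Char) (n r s : Nat)
    (hr : n ≤ r * key.length) (hs : n ≤ s * key.length) :
    ((List.replicate r key).flatten).take n = ((List.replicate s key).flatten).take n := by
  have aux : ∀ (r s : Nat), n ≤ r * key.length → r ≤ s →
      ((List.replicate s key).flatten).take n = ((List.replicate r key).flatten).take n := by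
    intro r s hr hrs
    have hsplit : s = r + (s - r) := by omega
    rw [hsplit, List.replicate_add, List.flatten_append]
    have hlen : n ≤ ((List.replicate r key).flatten).length := by
      rw [length_flatten_replicate]; exact hr
    rw [List.take_append_of_le_length hlen]
  rcases Nat.le_total r s with h | h
  · exact (aux r s hr h).symm
  · exact aux s r hs h

theorem stretch_key_spec_aux (key text : String) (hk : key ≠ "") :
    stretch_key key text = stretch_key_alt key text := by
  have hkl : key.toList ≠ [] := fun h => hk (String.toList_eq_nil_iff.mp h)
  have hklen : 0 < key.toList.length := List.length_pos_of_ne_nil hkl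
  simp only [stretch_key, stretch_key_alt]
  congr 1
  rw [loop_eq_cyc key.toList hkl text.toList.length (text.toList.length + 1) 0 [] (by omega) (by simp)]
  rw [cyc_eq_rep key.toList hkl (text.toList.length + 1) 0 (by omega)]
  have h0 : (if (0 : Nat) = key.toList.length then 0 else 0) = 0 := by split <;> rfl
  rw [h0, List.drop_zero, List.nil_append]
  have hgrow : key.toList ++ (List.replicate (text.toList.length + 1) key.toList).flatten
      = (List.replicate (text.toList.length + 2) key.toList).flatten := by
    simp [List.replicate_succ]
  rw [hgrow]
  apply take_rep_eq key.toList
  · have := Nat.le_mul_of_pos_right (text.toList.length + 2) hklen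
    omega
  · have hdm := Nat.div_add_mod (text.toList.length + 1) key.toList.length
    have hmod : (text.toList.length + 1) % key.toList.length < key.toList.length :=
      Nat.mod_lt _ hklen
    have hexp : ((text.toList.length + 1) / key.toList.length + 1) * key.toList.length
        = key.toList.length * ((text.toList.length + 1) / key.toList.length) + key.toList.length := by
      ring
    rw [hexp]
    omega

-- ===== VERDICT (by name: the statement is the Claim_ definition above) =====
theorem stretch_key_spec : Claim_equal_stretch_key := by
  intro key text _ hpre
  exact stretch_key_spec_aux key text hpre
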